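-- pv_equiv track=rewrite | github.com/Virtualbasic/Matura | 2017 czerwiec/2.2.py | reg
-- ===== SOURCE A (Python) =====
-- def reg(w,n):
--     if n == 1 :
--         return 1
--     elif n % 2 == 0:
--             m = n//2
--     else:
--         m = (n-1) //2
--     for i in range(1, m+1):
--             if w[i-1] != w[n-i]:
--                 return  0
--     x = w[:m]
--     return  1 + reg(x, m)
-- ===== SOURCE B (Python) =====
-- def reg(w, n):
--     # Iterative halving with a level counter instead of recursion; the per-level
--     # mirror check is a short-circuiting any() over the half indices.
--     count = 0
--     while n != 1:
--         m = n // 2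
--         if any(w[i] != w[n - 1 - i] for i in range(m)):
--             return count
--         count += 1
--         w = w[:m]
--         n = m
--     return count + 1
-- ===== Notes on version B (the rewrite author's own statement) =====
-- stated objective: alternative
-- what changed: Replaces A's recursion (with per-parity m branches and an element-by-element index loop) by an iterative halving loop with a level counter whose per-level palindrome check is a single slice-vs-reversed-slice comparison.
import Mathlib
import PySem

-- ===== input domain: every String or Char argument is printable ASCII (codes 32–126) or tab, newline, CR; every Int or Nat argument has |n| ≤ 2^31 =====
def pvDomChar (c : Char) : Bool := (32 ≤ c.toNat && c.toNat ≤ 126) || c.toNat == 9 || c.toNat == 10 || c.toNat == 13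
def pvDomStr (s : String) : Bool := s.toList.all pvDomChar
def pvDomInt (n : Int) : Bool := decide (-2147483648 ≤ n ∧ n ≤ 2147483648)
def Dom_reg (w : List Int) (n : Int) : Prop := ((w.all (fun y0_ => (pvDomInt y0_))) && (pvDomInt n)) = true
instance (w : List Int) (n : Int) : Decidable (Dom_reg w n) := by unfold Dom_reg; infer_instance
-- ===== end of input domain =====

-- B replaces A's recursion by an iterative halving loop with a level counter whose
-- per-level mirror check is a short-circuiting any() (objective: alternative decomposition).

-- ===== PORT A =====
-- the 'for i in range(1, m+1): if w[i-1] != w[n-i]: return 0' scan, early exit on mismatch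
def regALoop (w : List Int) (n : Int) : List Int → Bool
  | [] => true
  | i :: rest =>
    if PySem.List.pyGetD w (i - 1) 0 ≠ PySem.List.pyGetD w (n - i) 0 then false
    else regALoop w n rest

-- fuel makes the recursion total; 'reg' supplies n.toNat + 1, enough on every input Pre_ admits
def regAFuel : Nat → List Int → Int → Int
  | 0, _, _ => 0
  | f + 1, w, n =>
    if n = 1 then 1
    else
      let m := if PySem.Int.mod n 2 = 0 then PySem.Int.floordiv n 2
               else PySem.Int.floordiv (n - 1) 2
      if regALoop w n (PySem.List.pyRange 1 (m + 1) 1) then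
        1 + regAFuel f (PySem.List.slice w none (some m)) m
      else 0

def reg (w : List Int) (n : Int) : Int := regAFuel (n.toNat + 1) w n

-- ===== PORT B =====
def regBFuel : Nat → List Int → Int → Int → Int
  | 0, _, _, _ => 0
  | f + 1, w, n, count =>
    if n = 1 then count + 1
    else
      let m := PySem.Int.floordiv n 2
      if (PySem.List.pyRange 0 m 1).any
          (fun i => !(PySem.List.pyGetD w i 0 == PySem.List.pyGetD w (n - 1 - i) 0)) then
        count
      else regBFuel f (PySem.List.slice w none (some m)) m (count + 1)

def reg_alt (w : List Int) (n : Int) : Int := regBFuel (n.toNat + 1) w n 0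

-- ===== PRECONDITION & SPEC =====
-- Pre_ excludes exactly the inputs on which the Python A does not return: n ≤ 0 (unbounded
-- recursion, RecursionError) and n ≥ 2 with n > len(w) (IndexError at w[n-1] on the first iteration).
def Pre_reg (w : List Int) (n : Int) : Prop := 1 ≤ n ∧ (n = 1 ∨ n ≤ (w.length : Int))
instance (w : List Int) (n : Int) : Decidable (Pre_reg w n) := by unfold Pre_reg; infer_instance
def pvWitness_reg : List Int × Int := ([1, 2, 2, 1], 4)

def Spec_reg (w : List Int) (n : Int) (out : Int) : Prop := out = reg_alt w n
instance (w : List Int) (n : Int) (out : Int) : Decidable (Spec_reg w n out) := by unfold Spec_reg; infer_instance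

-- ===== CLAIM (what is proved, stated in full; the proofs are below) =====
def Claim_equal_reg : Prop := ∀ (w : List Int) (n : Int), Dom_reg w n → Pre_reg w n → Spec_reg w n (reg w n)

-- ===== LEMMAS AND PROOFS =====

-- both of A's parity branches compute n // 2
lemma regA_m_eq (n : Int) :
    (if PySem.Int.mod n 2 = 0 then PySem.Int.floordiv n 2 else PySem.Int.floordiv (n - 1) 2)
      = PySem.Int.floordiv n 2 := by
  rw [PySem.Int.mod_eq_emod_of_pos (by norm_num),
      PySem.Int.floordiv_eq_ediv_of_pos (a := n) (by norm_num),
      PySem.Int.floordiv_eq_ediv_of_pos (a := n - 1) (by norm_num)]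
  split_ifs with h
  · rfl
  · omega

-- A's index scan is the all-quantified pointwise condition
lemma regALoop_eq_all (w : List Int) (n : Int) (r : List Int) :
    regALoop w n r = r.all (fun i => PySem.List.pyGetD w (i - 1) 0 == PySem.List.pyGetD w (n - i) 0) := by
  induction r with
  | nil => rfl
  | cons i rest ih =>
    by_cases h : PySem.List.pyGetD w (i - 1) 0 = PySem.List.pyGetD w (n - i) 0
    · simp [regALoop, h, ih]
    · simp [regALoop, h]

-- B's any() over range(m) is the negation of A's scan over range(1, m+1)
lemma check_eq (w : List Int) (n m : Int) :
    ((PySem.List.pyRange 0 m 1).any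
        (fun i => !(PySem.List.pyGetD w i 0 == PySem.List.pyGetD w (n - 1 - i) 0)))
      = !(regALoop w n (PySem.List.pyRange 1 (m + 1) 1)) := by
  rw [regALoop_eq_all, List.any_eq_not_all_not]
  congr 1
  rw [PySem.List.pyRange_one 1 (m + 1), PySem.List.pyRange_one 0 m, List.all_map, List.all_map]
  apply List.all_congr
  · congr 2
    omega
  · intro k
    simp only [Function.comp_apply, Bool.not_not]
    have e1 : (1 : Int) + k - 1 = 0 + k := by ring
    have e2 : n - (1 + (k : Int)) = n - 1 - (0 + k) := by ring
    rw [e1, e2]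

-- the loop with accumulator computes the accumulator plus A's recursion
lemma main_ind : ∀ (f : Nat) (w : List Int) (n c : Int),
    1 ≤ n → (n = 1 ∨ n ≤ (w.length : Int)) → n.toNat < f →
    regBFuel f w n c = c + regAFuel f w n := by
  intro f
  induction f with
  | zero => intro w n c h1 _ hf; exact absurd hf (by omega)
  | succ f ih =>
    intro w n c h1 h2 hf
    by_cases hn1 : n = 1
    · simp [regBFuel, regAFuel, hn1]
    · have hlen : n ≤ (w.length : Int) := h2.resolve_left hn1
      have hmdef : PySem.Int.floordiv n 2 = n / 2 :=
        PySem.Int.floordiv_eq_ediv_of_pos (by norm_num)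
      have hxlen : (PySem.List.slice w none (some (PySem.Int.floordiv n 2))).length
          = (PySem.Int.floordiv n 2).toNat := by
        rw [PySem.List.slice_to w (by omega)]
        simp [List.length_take]
        omega
      simp only [regBFuel, regAFuel, if_neg hn1, regA_m_eq, check_eq]
      by_cases hc : regALoop w n (PySem.List.pyRange 1 (PySem.Int.floordiv n 2 + 1) 1) = true
      · rw [hc]
        simp only [Bool.not_true, Bool.false_eq_true, if_false, if_true]
        rw [ih _ _ (c + 1) (by omega) (by right; rw [hxlen]; omega) (by omega)]
        ring
      · have hc' : regALoop w n (PySem.List.pyRange 1 (PySem.Int.floordiv n 2 + 1) 1) = false :=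
          Bool.eq_false_iff.2 hc
        rw [hc']
        simp only [Bool.not_false, Bool.false_eq_true, if_true, if_false]
        ring

-- ===== VERDICT (by name: the statement is the Claim_ definition above) =====
theorem reg_spec : Claim_equal_reg := by
  intro w n _ hpre
  unfold Spec_reg reg reg_alt
  rw [main_ind (n.toNat + 1) w n 0 hpre.1 hpre.2 (by omega)]
  ring
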